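-- pv_equiv track=rewrite | github.com/winktool/windsurf-assistant | pipeline/_genesis_engine.py | classify_plan_fields
-- ===== SOURCE A (Python) =====
-- def classify_plan_fields(fields: dict) -> str:
--     """从protobuf fields推断真实plan类型. 返回 pro_trial/free/unknown."""
--     strings = []
--     for fn, vals in fields.items():
--         for v in vals:
--             if v.get('string'):
--                 strings.append((fn, v['string'].lower()))
--     for fn, s in strings:
--         if 'pro_trial' in s or ('pro' in s and 'trial' in s):
--             return 'pro_trial'
--     for fn, s in strings:
--         if 'trial' in s:
--             return 'pro_trial'
--     for fn, s in strings:
--         if s.strip() == 'free':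
--             return 'free'
--     if strings:
--         return 'unknown'
--     return 'no_response'
-- ===== SOURCE B (Python) =====
-- def classify_plan_fields(fields: dict) -> str:
--     """从protobuf fields推断真实plan类型. 返回 pro_trial/free/unknown."""
--     has_trial = has_free = saw_any = False
--     for fn, vals in fields.items():
--         for v in vals:
--             s = v.get('string')
--             if s:
--                 saw_any = True
--                 t = s.lower()
--                 if 'trial' in t:
--                     has_trial = True
--                 if t.strip() == 'free':
--                     has_free = True
--     if has_trial:
--         return 'pro_trial'
--     if has_free:
--         return 'free'
--     if saw_any:
--         return 'unknown'
--     return 'no_response'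
-- ===== Notes on version B (the rewrite author's own statement) =====
-- stated objective: simpler
-- what changed: B replaces A's intermediate (field,string) list plus three separate priority scans (two of which both mean 'some string contains trial') with a single flag-accumulating pass over the fields, returning from the three flags at the end.
import Mathlib
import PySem

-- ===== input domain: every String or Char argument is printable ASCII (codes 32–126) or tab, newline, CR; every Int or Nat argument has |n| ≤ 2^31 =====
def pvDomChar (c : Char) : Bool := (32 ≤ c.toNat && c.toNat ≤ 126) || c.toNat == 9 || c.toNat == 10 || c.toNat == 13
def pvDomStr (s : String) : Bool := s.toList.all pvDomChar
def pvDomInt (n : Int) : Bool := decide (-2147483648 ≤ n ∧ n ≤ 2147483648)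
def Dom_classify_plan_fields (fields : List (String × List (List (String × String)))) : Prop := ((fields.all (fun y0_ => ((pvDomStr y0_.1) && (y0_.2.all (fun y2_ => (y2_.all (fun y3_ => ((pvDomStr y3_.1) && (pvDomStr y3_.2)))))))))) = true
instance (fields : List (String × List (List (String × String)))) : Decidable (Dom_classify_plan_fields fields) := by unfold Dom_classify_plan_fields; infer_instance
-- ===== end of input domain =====

-- B replaces A's intermediate list + three priority scans by one flag-accumulating pass (simpler, same O(n) cost).

-- ===== PORT A =====
def classify_plan_fields (fields : List (String × List (List (String × String)))) : String :=
  let strings : List (String × String) :=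
    fields.foldl (fun acc p =>
      p.2.foldl (fun acc2 v =>
        match (PySem.Dict.mk v).get? "string" with
        | some s => if s = "" then acc2 else acc2 ++ [(p.1, PySem.Str.lower s)]
        | none => acc2) acc) []
  match strings.find? (fun q => PySem.Str.isIn "pro_trial" q.2 || (PySem.Str.isIn "pro" q.2 && PySem.Str.isIn "trial" q.2)) with
  | some _ => "pro_trial"
  | none =>
    match strings.find? (fun q => PySem.Str.isIn "trial" q.2) with
    | some _ => "pro_trial"
    | none =>
      match strings.find? (fun q => PySem.Str.strip q.2 == "free") with
      | some _ => "free"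
      | none => if strings.isEmpty then "no_response" else "unknown"

-- ===== PORT B =====
def classify_plan_fields_alt (fields : List (String × List (List (String × String)))) : String :=
  let flags : Bool × Bool × Bool :=
    fields.foldl (fun fl p =>
      p.2.foldl (fun fl v =>
        match (PySem.Dict.mk v).get? "string" with
        | some s =>
          if s = "" then fl else
            let t := PySem.Str.lower s
            (fl.1 || PySem.Str.isIn "trial" t, fl.2.1 || (PySem.Str.strip t == "free"), true)
        | none => fl) fl) (false, false, false)
  if flags.1 then "pro_trial"
  else if flags.2.1 then "free"
  else if flags.2.2 then "unknown"
  else "no_response"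

-- ===== PRECONDITION & SPEC =====
def Spec_classify_plan_fields (fields : List (String × List (List (String × String)))) (out : String) : Prop := out = classify_plan_fields_alt fields
instance (fields : List (String × List (List (String × String)))) (out : String) : Decidable (Spec_classify_plan_fields fields out) := by unfold Spec_classify_plan_fields; infer_instance

-- ===== CLAIM (what is proved, stated in full; the proofs are below) =====
def Claim_equal_classify_plan_fields : Prop := ∀ (fields : List (String × List (List (String × String)))), Dom_classify_plan_fields fields → Spec_classify_plan_fields fields (classify_plan_fields fields)

-- ===== LEMMAS AND PROOFS =====

-- the (fn, lowered nonempty 'string' value) pairs both programs traverse, as one flat list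
def pvExt (fn : String) (v : List (String × String)) : Option (String × String) :=
  match (PySem.Dict.mk v).get? "string" with
  | some s => if s = "" then none else some (fn, PySem.Str.lower s)
  | none => none

def pvC (fields : List (String × List (List (String × String)))) : List (String × String) :=
  fields.flatMap (fun p => p.2.filterMap (pvExt p.1))

def pvTrialP (q : String × String) : Bool := PySem.Str.isIn "trial" q.2
def pvFreeP (q : String × String) : Bool := PySem.Str.strip q.2 == "free"

lemma pvA_step (fn : String) (v : List (String × String)) (acc2 : List (String × String)) :
    (match (PySem.Dict.mk v).get? "string" with
     | some s => if s = "" then acc2 else acc2 ++ [(fn, PySem.Str.lower s)]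
     | none => acc2) = acc2 ++ (pvExt fn v).toList := by
  unfold pvExt
  cases h : (PySem.Dict.mk v).get? "string" with
  | none => simp
  | some s => by_cases hs : s = "" <;> simp [hs]

lemma pvB_step (fn : String) (v : List (String × String)) (fl : Bool × Bool × Bool) :
    (match (PySem.Dict.mk v).get? "string" with
     | some s =>
       if s = "" then fl else
         let t := PySem.Str.lower s
         (fl.1 || PySem.Str.isIn "trial" t, fl.2.1 || (PySem.Str.strip t == "free"), true)
     | none => fl)
    = (match pvExt fn v with
       | some q => (fl.1 || pvTrialP q, fl.2.1 || pvFreeP q, true)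
       | none => fl) := by
  unfold pvExt pvTrialP pvFreeP
  cases h : (PySem.Dict.mk v).get? "string" with
  | none => simp
  | some s => by_cases hs : s = "" <;> simp [hs]

lemma pvA_inner (fn : String) (vals : List (List (String × String))) (acc : List (String × String)) :
    vals.foldl (fun acc2 v =>
      match (PySem.Dict.mk v).get? "string" with
      | some s => if s = "" then acc2 else acc2 ++ [(fn, PySem.Str.lower s)]
      | none => acc2) acc = acc ++ vals.filterMap (pvExt fn) := by
  induction vals generalizing acc with
  | nil => simp
  | cons v rest ih =>
    rw [List.foldl_cons, pvA_step, List.filterMap_cons]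
    cases h : pvExt fn v with
    | none => simp only [Option.toList_none, List.append_nil]; rw [ih]
    | some q => simp only [Option.toList_some]; rw [ih]; simp

lemma pvA_outer (fields : List (String × List (List (String × String)))) (acc : List (String × String)) :
    fields.foldl (fun acc p =>
      p.2.foldl (fun acc2 v =>
        match (PySem.Dict.mk v).get? "string" with
        | some s => if s = "" then acc2 else acc2 ++ [(p.1, PySem.Str.lower s)]
        | none => acc2) acc) acc = acc ++ pvC fields := by
  induction fields generalizing acc with
  | nil => simp [pvC]
  | cons p rest ih =>
    rw [List.foldl_cons, pvA_inner, ih]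
    simp [pvC, List.flatMap_cons]

lemma pvB_inner (fn : String) (vals : List (List (String × String))) (fl : Bool × Bool × Bool) :
    vals.foldl (fun fl v =>
      match (PySem.Dict.mk v).get? "string" with
      | some s =>
        if s = "" then fl else
          let t := PySem.Str.lower s
          (fl.1 || PySem.Str.isIn "trial" t, fl.2.1 || (PySem.Str.strip t == "free"), true)
      | none => fl) fl
    = (fl.1 || (vals.filterMap (pvExt fn)).any pvTrialP,
       fl.2.1 || (vals.filterMap (pvExt fn)).any pvFreeP,
       fl.2.2 || !(vals.filterMap (pvExt fn)).isEmpty) := by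
  induction vals generalizing fl with
  | nil => simp
  | cons v rest ih =>
    rw [List.foldl_cons, pvB_step fn, List.filterMap_cons]
    cases pvExt fn v with
    | none => rw [ih]
    | some q => rw [ih]; simp [Bool.or_assoc]

lemma pv_not_isEmpty_append {α : Type} (a b : List α) : (!(a ++ b).isEmpty) = (!a.isEmpty || !b.isEmpty) := by
  cases a <;> simp

lemma pvB_outer (fields : List (String × List (List (String × String)))) (fl : Bool × Bool × Bool) :
    fields.foldl (fun fl p =>
      p.2.foldl (fun fl v =>
        match (PySem.Dict.mk v).get? "string" with
        | some s =>
          if s = "" then fl else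
            let t := PySem.Str.lower s
            (fl.1 || PySem.Str.isIn "trial" t, fl.2.1 || (PySem.Str.strip t == "free"), true)
        | none => fl) fl) fl
    = (fl.1 || (pvC fields).any pvTrialP,
       fl.2.1 || (pvC fields).any pvFreeP,
       fl.2.2 || !(pvC fields).isEmpty) := by
  induction fields generalizing fl with
  | nil => simp [pvC]
  | cons p rest ih =>
    rw [List.foldl_cons, pvB_inner p.1, ih]
    simp [pvC, List.flatMap_cons, Bool.or_assoc, pv_not_isEmpty_append]

-- any string containing 'pro_trial' (or both 'pro' and 'trial') contains 'trial'
lemma pvP1_imp_trial (q : String × String)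
    (h : (PySem.Str.isIn "pro_trial" q.2 || (PySem.Str.isIn "pro" q.2 && PySem.Str.isIn "trial" q.2)) = true) :
    pvTrialP q = true := by
  unfold pvTrialP
  rcases Bool.or_eq_true_iff.mp h with h1 | h2
  · rw [PySem.Str.isIn_iff_infix] at h1 ⊢
    exact List.IsInfix.trans (by decide) h1
  · exact (Bool.and_eq_true_iff.mp h2).2

-- ===== VERDICT (by name: the statement is the Claim_ definition above) =====
theorem classify_plan_fields_spec : Claim_equal_classify_plan_fields := by
  intro fields _
  unfold Spec_classify_plan_fields classify_plan_fields classify_plan_fields_alt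
  rw [pvA_outer, pvB_outer]
  simp only [List.nil_append, Bool.false_or]
  by_cases ht : (pvC fields).any pvTrialP = true
  · obtain ⟨q, hq, hqt⟩ := List.any_eq_true.mp ht
    simp only [ht, if_true]
    cases h1 : (pvC fields).find? (fun q => PySem.Str.isIn "pro_trial" q.2 || (PySem.Str.isIn "pro" q.2 && PySem.Str.isIn "trial" q.2)) with
    | some _ => rfl
    | none =>
      have h2 : ((pvC fields).find? (fun q => PySem.Str.isIn "trial" q.2)).isSome :=
        List.find?_isSome.mpr ⟨q, hq, hqt⟩
      cases h3 : (pvC fields).find? (fun q => PySem.Str.isIn "trial" q.2) with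
      | some _ => rfl
      | none => rw [h3] at h2; simp at h2
  · have htf : (pvC fields).any pvTrialP = false := by simpa using ht
    have hnone : ∀ x ∈ pvC fields, ¬ pvTrialP x = true := by
      intro x hx hxt
      exact ht (List.any_eq_true.mpr ⟨x, hx, hxt⟩)
    have h1 : (pvC fields).find? (fun q => PySem.Str.isIn "pro_trial" q.2 || (PySem.Str.isIn "pro" q.2 && PySem.Str.isIn "trial" q.2)) = none := by
      apply List.find?_eq_none.mpr
      intro x hx hxp
      exact hnone x hx (pvP1_imp_trial x hxp)
    have h2 : (pvC fields).find? (fun q => PySem.Str.isIn "trial" q.2) = none := by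
      apply List.find?_eq_none.mpr
      intro x hx hxp
      exact hnone x hx hxp
    rw [h1, h2]
    simp only [htf, Bool.false_eq_true, if_false]
    by_cases hf : (pvC fields).any pvFreeP = true
    · obtain ⟨q, hq, hqf⟩ := List.any_eq_true.mp hf
      have h3 : ((pvC fields).find? (fun q => PySem.Str.strip q.2 == "free")).isSome :=
        List.find?_isSome.mpr ⟨q, hq, hqf⟩
      cases h4 : (pvC fields).find? (fun q => PySem.Str.strip q.2 == "free") with
      | some _ => simp [hf]
      | none => rw [h4] at h3; simp at h3
    · have hff : (pvC fields).any pvFreeP = false := by simpa using hf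
      have h4 : (pvC fields).find? (fun q => PySem.Str.strip q.2 == "free") = none := by
        apply List.find?_eq_none.mpr
        intro x hx hxp
        exact hf (List.any_eq_true.mpr ⟨x, hx, hxp⟩)
      rw [h4]
      simp only [hff, Bool.false_eq_true, if_false]
      rcases Bool.eq_false_or_eq_true ((pvC fields).isEmpty) with hE | hE <;> simp [hE]
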